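-- pv_equiv track=rewrite | github.com/Hinski2/school | modeleJezykowe/llm_zip/src/llm_zip/utils/gamma.py | gamma_encode
-- ===== SOURCE A (Python) =====
-- from typing import List
--
-- def gamma_encode(x: int) -> List[bool]:
--     ans: List[bool] = []
--     binary_representation: List[bool] = []
--
--     while x:
--         binary_representation.append(x & 1 == 1)
--         x //= 2
--     binary_representation.reverse()
--
--     for _ in range(len(binary_representation) - 1):
--         ans.append(False)
--
--     return ans + binary_representation
-- ===== SOURCE B (Python) =====
-- from typing import List
--
-- def gamma_encode(x: int) -> List[bool]:
--     n = x.bit_length()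
--     return [False] * (n - 1) + [(x >> i) & 1 == 1 for i in range(n - 1, -1, -1)]
-- ===== Notes on version B (the rewrite author's own statement) =====
-- stated objective: alternative
-- what changed: B computes n = x.bit_length() first and emits the codeword in one MSB-to-LSB pass ([False]*(n-1) prefix plus a high-to-low shift comprehension), replacing A's low-to-high division loop that builds the bit list and then reverses it.
-- outside the precondition, e.g. on gamma_encode(-1): A does not finish within the time limit, B returns [True]
import Mathlib
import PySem

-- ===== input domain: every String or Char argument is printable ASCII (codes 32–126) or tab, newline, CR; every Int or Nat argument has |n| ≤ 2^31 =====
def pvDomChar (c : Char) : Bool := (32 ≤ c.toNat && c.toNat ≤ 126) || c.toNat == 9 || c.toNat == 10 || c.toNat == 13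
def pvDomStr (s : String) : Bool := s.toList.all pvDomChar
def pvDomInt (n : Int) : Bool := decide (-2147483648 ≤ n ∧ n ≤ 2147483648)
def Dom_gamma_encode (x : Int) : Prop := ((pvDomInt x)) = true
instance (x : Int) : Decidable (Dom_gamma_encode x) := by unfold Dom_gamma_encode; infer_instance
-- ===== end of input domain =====

-- B computes the bit length first and emits the codeword MSB-to-LSB by shifting, instead of
-- A's low-to-high division loop plus reverse (objective: alternative decomposition, same cost).

-- ===== PORT A =====
-- the 'while x' loop of A; fuel only makes the recursion total (x.natAbs iterations always
-- suffice for nonnegative x, the inputs admitted by Pre_; Python A loops forever on x < 0)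
def gammaLoopA : Int → Nat → List Bool
  | _, 0 => []
  | x, fuel+1 =>
    if x ≠ 0 then (PySem.Int.band x 1 == 1) :: gammaLoopA (PySem.Int.floordiv x 2) fuel
    else []

def gamma_encode (x : Int) : List Bool :=
  let binary_representation := (gammaLoopA x x.natAbs).reverse
  let ans := (PySem.List.pyRange 0 ((binary_representation.length : Int) - 1) 1).foldl
    (fun a _ => a ++ [false]) []
  ans ++ binary_representation

-- ===== PORT B =====
-- x.bit_length() is PySem.Int.bitLength; [False]*(n-1) is List.replicate (Nat subtraction
-- makes the prefix empty exactly where Python's negative list repeat does)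
def gamma_encode_alt (x : Int) : List Bool :=
  let n := PySem.Int.bitLength x
  List.replicate (n - 1) false ++
    (PySem.List.pyRange ((n : Int) - 1) (-1) (-1)).map (fun i => (PySem.Int.band (x >>> i.toNat) 1 == 1))

-- ===== PRECONDITION & SPEC =====
-- Pre_ excludes x < 0: there Python A's 'x //= 2' never reaches 0, so A loops forever and
-- returns nothing.
def Pre_gamma_encode (x : Int) : Prop := 0 ≤ x
instance (x : Int) : Decidable (Pre_gamma_encode x) := by unfold Pre_gamma_encode; infer_instance
def pvWitness_gamma_encode : Int := (13)
def Spec_gamma_encode (x : Int) (out : List Bool) : Prop := out = gamma_encode_alt x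
instance (x : Int) (out : List Bool) : Decidable (Spec_gamma_encode x out) := by unfold Spec_gamma_encode; infer_instance

-- ===== CLAIM (what is proved, stated in full; the proofs are below) =====
def Claim_equal_gamma_encode : Prop := ∀ (x : Int), Dom_gamma_encode x → Pre_gamma_encode x → Spec_gamma_encode x (gamma_encode x)

-- ===== LEMMAS AND PROOFS =====

-- the LSB-first bit list, A's loop expressed over Nat
def lowbits (n : Nat) : List Bool :=
  if h : n = 0 then [] else decide (n % 2 = 1) :: lowbits (n / 2)
decreasing_by exact Nat.div_lt_self (Nat.pos_of_ne_zero h) one_lt_two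

lemma size_div_two (n : Nat) (h : n ≠ 0) : n.size = (n / 2).size + 1 := by
  have hb := Nat.bit_decide_mod_two_eq_one_shiftRight_one n
  have hs := Nat.size_bit (b := decide (n % 2 = 1)) (n := n >>> 1) (by rw [hb]; exact h)
  rw [hb] at hs
  simpa [Nat.shiftRight_one] using hs

lemma bitLength_eq_size (n : Nat) : PySem.Int.bitLength (n : Int) = n.size := by
  induction n using Nat.strong_induction_on with
  | _ n ih =>
    by_cases h : n = 0
    · subst h; simp [PySem.Int.bitLength_zero, Nat.size_zero]
    · rw [PySem.Int.bitLength_natCast (Nat.pos_of_ne_zero h),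
        ih (n / 2) (Nat.div_lt_self (Nat.pos_of_ne_zero h) one_lt_two),
        size_div_two n h]

lemma band_one_natCast (a : Nat) : PySem.Int.band (a : Int) 1 = ((a % 2 : Nat) : Int) := by
  have := PySem.Int.band_natCast a 1
  simpa [Nat.and_one_is_mod] using this

lemma beq_natCast_one (a : Nat) : ((a : Int) == (1 : Int)) = decide (a = 1) := by
  by_cases h : a = 1 <;> simp [h]

lemma gammaLoopA_eq_lowbits (fuel n : Nat) (hf : n ≤ fuel) :
    gammaLoopA (n : Int) fuel = lowbits n := by
  induction fuel generalizing n with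
  | zero =>
    obtain rfl : n = 0 := by omega
    simp [gammaLoopA, lowbits]
  | succ fuel ih =>
    by_cases h : n = 0
    · subst h; simp [gammaLoopA, lowbits]
    · rw [lowbits, dif_neg h]
      simp only [gammaLoopA, if_pos (show (n : Int) ≠ 0 by exact_mod_cast h)]
      have hfd : PySem.Int.floordiv (n : Int) 2 = ((n / 2 : Nat) : Int) := by
        exact_mod_cast PySem.Int.floordiv_natCast n 2
      rw [hfd, ih _ (by omega)]
      congr 1
      rw [band_one_natCast, beq_natCast_one]

lemma lowbits_eq_map (n : Nat) :
    lowbits n = (List.range n.size).map (fun k => decide (n / 2 ^ k % 2 = 1)) := by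
  induction n using Nat.strong_induction_on with
  | _ n ih =>
    by_cases h : n = 0
    · subst h; simp [lowbits, Nat.size_zero]
    · rw [lowbits, dif_neg h, size_div_two n h, List.range_succ_eq_map,
        ih (n / 2) (Nat.div_lt_self (Nat.pos_of_ne_zero h) one_lt_two)]
      simp only [List.map_cons, List.map_map]
      congr 1
      · simp
      apply List.map_congr_left
      intro k _
      simp only [Function.comp_apply]
      congr 1
      rw [pow_succ, ← Nat.div_div_eq_div_mul, Nat.div_div_eq_div_mul, Nat.mul_comm,
        ← Nat.div_div_eq_div_mul]

lemma foldl_append_false (l : List Int) (acc : List Bool) :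
    l.foldl (fun a _ => a ++ [false]) acc = acc ++ List.replicate l.length false := by
  induction l generalizing acc with
  | nil => simp
  | cons x xs ih =>
    simp [List.foldl_cons, ih, List.replicate_succ, List.append_assoc]

-- ===== VERDICT (by name: the statement is the Claim_ definition above) =====
theorem gamma_encode_spec : Claim_equal_gamma_encode := by
  intro x _ hpre
  unfold Spec_gamma_encode gamma_encode gamma_encode_alt
  obtain ⟨n, rfl⟩ : ∃ n : Nat, x = (n : Int) := ⟨x.toNat, (Int.toNat_of_nonneg hpre).symm⟩
  simp only [Int.natAbs_natCast, bitLength_eq_size]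
  rw [gammaLoopA_eq_lowbits n n le_rfl, lowbits_eq_map, foldl_append_false]
  -- the unary prefixes agree
  have hlen : (PySem.List.pyRange 0
      ((((List.range n.size).map (fun k => decide (n / 2 ^ k % 2 = 1))).reverse.length : Int) - 1) 1).length
      = n.size - 1 := by
    rw [PySem.List.length_pyRange_one]; simp
  rw [hlen]
  congr 1
  -- the binary suffixes agree
  rw [PySem.List.pyRange_neg_one_eq_reverse,
    show ((-1 : Int) + 1) = 0 by ring, show ((n.size : Int) - 1 + 1) = (n.size : Int) by ring,
    PySem.List.pyRange_zero_natCast]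
  rw [List.map_reverse, List.map_map]
  congr 1
  apply List.map_congr_left
  intro k _
  simp only [Function.comp_apply, Int.toNat_natCast]
  rw [Int.shiftRight_natCast n k, band_one_natCast, beq_natCast_one]
  congr 1
  rw [Nat.shiftRight_eq_div_pow]
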